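-- pv_equiv track=rewrite | github.com/sneha-byte/AI-Chatbot | ai-chatbot/backend/app.py | fix_markdown_tables
-- ===== SOURCE A (Python) =====
-- def fix_markdown_tables(text: str) -> str:
--     # Remove empty lines between rows
--     lines = text.split("\n")
--     new_lines = []
--     inside_table = False
--
--     for line in lines:
--         if "|" in line:
--             if not inside_table:
--                 inside_table = True
--             new_lines.append(line.strip())
--         else:
--             if inside_table and line.strip() == "":
--                 continue
--             new_lines.append(line)
--
--     return "\n".join(new_lines)
-- ===== SOURCE B (Python) =====
-- def fix_markdown_tables(text: str) -> str:
--     lines = text.split("\n")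
--     return "\n".join(
--         line.strip() if "|" in line else line
--         for i, line in enumerate(lines)
--         if "|" in line or line.strip() != "" or not any("|" in p for p in lines[:i])
--     )
-- ===== Notes on version B (the rewrite author's own statement) =====
-- stated objective: alternative
-- what changed: Replaces A's stateful loop with a running inside_table flag by a single stateless filter-map comprehension: each line is kept or dropped by an independent predicate that scans its prefix lines[:i] for an earlier pipe line (quadratic but declarative, no accumulator).
import Mathlib
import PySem

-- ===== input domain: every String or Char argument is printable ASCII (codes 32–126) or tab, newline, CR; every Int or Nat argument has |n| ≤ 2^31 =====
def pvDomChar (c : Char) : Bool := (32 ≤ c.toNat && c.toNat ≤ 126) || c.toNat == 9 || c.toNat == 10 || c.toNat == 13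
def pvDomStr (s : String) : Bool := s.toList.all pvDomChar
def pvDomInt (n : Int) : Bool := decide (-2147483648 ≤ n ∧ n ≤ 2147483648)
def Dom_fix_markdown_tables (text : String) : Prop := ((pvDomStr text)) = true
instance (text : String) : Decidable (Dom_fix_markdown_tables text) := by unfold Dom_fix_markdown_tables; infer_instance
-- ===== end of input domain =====

-- B replaces A's stateful flag loop by a stateless filter-map over enumerated lines whose keep-predicate scans the line's prefix (objective: alternative decomposition).

-- ===== PORT A =====
def fixA_go : Bool → List String → List String
  | _, [] => []
  | inside, l :: ls =>
    if PySem.Str.isIn "|" l then PySem.Str.strip l :: fixA_go true ls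
    else if inside && (PySem.Str.strip l == "") then fixA_go inside ls
    else l :: fixA_go inside ls

def fix_markdown_tables (text : String) : String :=
  PySem.Str.join "\n" (fixA_go false ((PySem.Str.split? text "\n").getD []))

-- ===== PORT B =====
def fix_markdown_tables_alt (text : String) : String :=
  let lines := (PySem.Str.split? text "\n").getD []
  PySem.Str.join "\n"
    (((PySem.List.enumerate lines).filter (fun p =>
        PySem.Str.isIn "|" p.2 || PySem.Str.strip p.2 != "" ||
        !((PySem.List.slice lines none (some p.1)).any (fun q => PySem.Str.isIn "|" q)))).map
      (fun p => if PySem.Str.isIn "|" p.2 then PySem.Str.strip p.2 else p.2))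

-- ===== PRECONDITION & SPEC =====
def Spec_fix_markdown_tables (text : String) (out : String) : Prop := out = fix_markdown_tables_alt text
instance (text : String) (out : String) : Decidable (Spec_fix_markdown_tables text out) := by unfold Spec_fix_markdown_tables; infer_instance

-- ===== CLAIM (what is proved, stated in full; the proofs are below) =====
def Claim_equal_fix_markdown_tables : Prop := ∀ (text : String), Dom_fix_markdown_tables text → Spec_fix_markdown_tables text (fix_markdown_tables text)

-- ===== LEMMAS AND PROOFS =====

lemma fixB_key (pre ls : List String) :
    ((PySem.List.enumerate ls (pre.length : Int)).filter (fun p =>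
        PySem.Str.isIn "|" p.2 || PySem.Str.strip p.2 != "" ||
        !((PySem.List.slice (pre ++ ls) none (some p.1)).any (fun q => PySem.Str.isIn "|" q)))).map
      (fun p => if PySem.Str.isIn "|" p.2 then PySem.Str.strip p.2 else p.2)
    = fixA_go (pre.any (fun l => PySem.Str.isIn "|" l)) ls := by
  induction ls generalizing pre with
  | nil => cases pre.any (fun l => PySem.Str.isIn "|" l) <;> rfl
  | cons l ls ih =>
    have hslice : PySem.List.slice (pre ++ l :: ls) none (some (pre.length : Int)) = pre := by
      rw [PySem.List.slice_to_natCast]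
      exact List.take_left ..
    have hrec := ih (pre ++ [l])
    rw [List.append_assoc] at hrec
    simp only [List.singleton_append, List.length_append, List.length_cons, List.length_nil,
      List.any_append, List.any_cons, List.any_nil, Bool.or_false] at hrec
    push_cast at hrec
    rw [PySem.List.enumerate_cons, List.filter_cons]
    simp only [PySem.Str.isIn_eq, show "|".toList = ['|'] from rfl] at hrec ⊢
    simp only [hslice]
    cases hc : PySem.Chars.isIn ['|'] l.toList with
    | true =>
      simp [fixA_go, hc, hrec]
    | false =>
      by_cases hb : PySem.Str.strip l = "" <;>
        cases ha : pre.any (fun q => PySem.Chars.isIn ['|'] q.toList) <;>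
          simp [fixA_go, hc, hb, ha, hrec]


-- ===== VERDICT (by name: the statement is the Claim_ definition above) =====
theorem fix_markdown_tables_spec : Claim_equal_fix_markdown_tables := by
  intro text _
  unfold Spec_fix_markdown_tables fix_markdown_tables fix_markdown_tables_alt
  have h := fixB_key [] ((PySem.Str.split? text "\n").getD [])
  simp only [List.nil_append, List.length_nil, Nat.cast_zero] at h
  simp only [h]
  rfl
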